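-- pv_equiv track=rewrite | github.com/urosh2003/Othello-Bot | f.py | niz_gore
-- ===== SOURCE A (Python) =====
-- def niz_gore(pozicija, i,j,protivnik):
--     potencijalni = []
--     for i in range(i-1, -1, -1):
--         if pozicija[i][j]==protivnik:
--             potencijalni.append((i,j))
--         elif pozicija[i][j]==' ':
--             return []
--         else:
--             return potencijalni
--     return []
-- ===== SOURCE B (Python) =====
-- def niz_gore(pozicija, i, j, protivnik):
--     r = i - 1
--     while r >= 0 and pozicija[r][j] == protivnik:
--         r -= 1
--     if r >= 0 and pozicija[r][j] != ' ':
--         return [(k, j) for k in range(i - 1, r, -1)]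
--     return []
-- ===== Notes on version B (the rewrite author's own statement) =====
-- stated objective: alternative
-- what changed: A interleaves collecting and deciding in one for-loop with three branches and an accumulator; B first advances an index r upward past the run of opponent discs with a while loop, then decides once from the boundary cell and builds the answer as a single range comprehension (no accumulator).
-- outside the precondition, e.g. on niz_gore([[], ['x']], 2, 0, 'o'): A returns [], B returns []
import Mathlib
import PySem

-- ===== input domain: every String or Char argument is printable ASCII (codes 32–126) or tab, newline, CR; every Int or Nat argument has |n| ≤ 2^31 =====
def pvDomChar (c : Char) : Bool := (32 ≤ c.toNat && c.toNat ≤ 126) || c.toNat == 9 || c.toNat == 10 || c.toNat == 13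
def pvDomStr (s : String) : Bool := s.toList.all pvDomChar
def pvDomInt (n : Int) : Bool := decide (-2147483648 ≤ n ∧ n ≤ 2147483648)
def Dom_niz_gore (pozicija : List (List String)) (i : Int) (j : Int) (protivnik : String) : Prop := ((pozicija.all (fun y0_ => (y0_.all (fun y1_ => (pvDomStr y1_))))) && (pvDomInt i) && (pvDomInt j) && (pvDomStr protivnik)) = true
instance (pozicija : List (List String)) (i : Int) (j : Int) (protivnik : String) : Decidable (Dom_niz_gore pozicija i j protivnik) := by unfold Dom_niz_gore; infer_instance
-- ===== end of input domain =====

-- B replaces A's single three-branch collecting loop by a boundary-finding while loop plus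
-- a one-shot decision and range comprehension (alternative decomposition, same cost).


-- ===== PORT A =====
-- loop 'for i in range(i-1, -1, -1)' over the list of indices; cell access via pyGet?
-- (none = IndexError, excluded by Pre_ below, port returns [] there)
def nizGoreLoopA (pozicija : List (List String)) (j : Int) (protivnik : String) :
    List Int → List (Int × Int) → List (Int × Int)
  | [], _ => []
  | k :: rest, acc =>
      match (PySem.List.pyGet? pozicija k).bind (fun row => PySem.List.pyGet? row j) with
      | none => []
      | some v =>
          if v = protivnik then nizGoreLoopA pozicija j protivnik rest (acc ++ [(k, j)])
          else if v = " " then []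
          else acc

def niz_gore (pozicija : List (List String)) (i : Int) (j : Int) (protivnik : String) : List (Int × Int) :=
  nizGoreLoopA pozicija j protivnik (PySem.List.pyRange (i - 1) (-1) (-1)) []

-- ===== PORT B =====
-- the while loop 'while r >= 0 and pozicija[r][j] == protivnik: r -= 1', fueled by i.toNat
-- (at most i iterations since r starts at i-1 and stops before -1)
def nizGoreFind (pozicija : List (List String)) (j : Int) (protivnik : String) :
    Int → Nat → Int
  | r, 0 => r
  | r, Nat.succ n =>
      if r ≥ 0 ∧ (PySem.List.pyGet? pozicija r).bind (fun row => PySem.List.pyGet? row j) = some protivnik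
      then nizGoreFind pozicija j protivnik (r - 1) n
      else r

def niz_gore_alt (pozicija : List (List String)) (i : Int) (j : Int) (protivnik : String) : List (Int × Int) :=
  let r := nizGoreFind pozicija j protivnik (i - 1) i.toNat
  if r ≥ 0 then
    match (PySem.List.pyGet? pozicija r).bind (fun row => PySem.List.pyGet? row j) with
    | none => []   -- IndexError in Python; excluded by Pre_
    | some v => if v ≠ " " then (PySem.List.pyRange (i - 1) r (-1)).map (fun k => (k, j)) else []
  else []

-- ===== PRECONDITION & SPEC =====
-- Pre_ requires every cell pozicija[k][j] for 0 ≤ k < i to exist (Python index rules, j may be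
-- negative): exactly the boards on which no access the scan could make raises IndexError.
-- This excludes some ragged boards on which A still returns because it stops before the bad
-- row; A and B stop at the same place there (see cites).
def Pre_niz_gore (pozicija : List (List String)) (i : Int) (j : Int) (protivnik : String) : Prop :=
  i.toNat ≤ pozicija.length ∧
  ∀ k : Nat, k < min i.toNat pozicija.length →
    ((PySem.List.pyGet? pozicija (k : Int)).bind (fun row => PySem.List.pyGet? row j)).isSome = true
instance (pozicija : List (List String)) (i : Int) (j : Int) (protivnik : String) : Decidable (Pre_niz_gore pozicija i j protivnik) := by unfold Pre_niz_gore; infer_instance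

def pvWitness_niz_gore : List (List String) × Int × Int × String := ([["x"], ["o"]], 2, 0, "o")

def Spec_niz_gore (pozicija : List (List String)) (i : Int) (j : Int) (protivnik : String) (out : List (Int × Int)) : Prop := out = niz_gore_alt pozicija i j protivnik
instance (pozicija : List (List String)) (i : Int) (j : Int) (protivnik : String) (out : List (Int × Int)) : Decidable (Spec_niz_gore pozicija i j protivnik out) := by unfold Spec_niz_gore; infer_instance

-- ===== CLAIM (what is proved, stated in full; the proofs are below) =====
def Claim_equal_niz_gore : Prop := ∀ (pozicija : List (List String)) (i : Int) (j : Int) (protivnik : String), Dom_niz_gore pozicija i j protivnik → Pre_niz_gore pozicija i j protivnik → Spec_niz_gore pozicija i j protivnik (niz_gore pozicija i j protivnik)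

-- ===== LEMMAS AND PROOFS =====

theorem nizGoreFind_le (pozicija : List (List String)) (j : Int) (protivnik : String) :
    ∀ (n : Nat) (r : Int), nizGoreFind pozicija j protivnik r n ≤ r := by
  intro n
  induction n with
  | zero => intro r; simp [nizGoreFind]
  | succ n ih =>
      intro r
      unfold nizGoreFind
      split
      · exact le_trans (ih (r - 1)) (by omega)
      · exact le_refl r

theorem nizGore_main (pozicija : List (List String)) (j : Int) (protivnik : String) :
    ∀ (n : Nat) (i : Int) (acc : List (Int × Int)), i.toNat = n →
      Pre_niz_gore pozicija i j protivnik →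
      nizGoreLoopA pozicija j protivnik (PySem.List.pyRange (i - 1) (-1) (-1)) acc =
      (let r := nizGoreFind pozicija j protivnik (i - 1) n
       if r ≥ 0 then
         match (PySem.List.pyGet? pozicija r).bind (fun row => PySem.List.pyGet? row j) with
         | none => []
         | some v => if v ≠ " " then acc ++ (PySem.List.pyRange (i - 1) r (-1)).map (fun k => (k, j)) else []
       else []) := by
  intro n
  induction n with
  | zero =>
      intro i acc hn _
      rw [PySem.List.pyRange_neg_one_eq_nil (by omega : i - 1 ≤ -1)]
      simp only [nizGoreLoopA, nizGoreFind]
      rw [if_neg (by omega : ¬ (i - 1 ≥ 0))]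
  | succ n ih =>
      intro i acc hn hpre
      have hi : 1 ≤ i := by omega
      -- the cell at row i-1 exists
      have hlen := hpre.1
      have hcell : (((PySem.List.pyGet? pozicija ((n : Nat) : Int)).bind (fun row => PySem.List.pyGet? row j))).isSome = true :=
        hpre.2 n (by omega)
      have hni : ((n : Nat) : Int) = i - 1 := by omega
      rw [hni] at hcell
      obtain ⟨v, hv⟩ := Option.isSome_iff_exists.mp hcell
      rw [PySem.List.pyRange_neg_one_cons (by omega : (-1 : Int) < i - 1)]
      simp only [nizGoreLoopA]
      rw [hv]
      by_cases hvp : v = protivnik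
      · -- opponent disc: both sides take one step
        simp only [if_pos hvp]
        have hpre' : Pre_niz_gore pozicija (i - 1) j protivnik :=
          ⟨by omega, fun k hk => hpre.2 k (by omega)⟩
        have hstep : nizGoreFind pozicija j protivnik (i - 1) (Nat.succ n)
            = nizGoreFind pozicija j protivnik (i - 1 - 1) n := by
          show (if (i - 1) ≥ 0 ∧ ((PySem.List.pyGet? pozicija (i - 1)).bind fun row => PySem.List.pyGet? row j) = some protivnik
                then nizGoreFind pozicija j protivnik (i - 1 - 1) n else (i - 1))
              = nizGoreFind pozicija j protivnik (i - 1 - 1) n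
          rw [if_pos ⟨by omega, by rw [hv, hvp]⟩]
        rw [ih (i - 1) (acc ++ [(i - 1, j)]) (by omega) hpre', hstep]
        simp only
        set r := nizGoreFind pozicija j protivnik (i - 1 - 1) n with hr
        have hrle : r ≤ i - 1 - 1 := nizGoreFind_le pozicija j protivnik n (i - 1 - 1)
        by_cases hr0 : r ≥ 0
        · rw [if_pos hr0, if_pos hr0]
          cases hg : (PySem.List.pyGet? pozicija r).bind (fun row => PySem.List.pyGet? row j) with
          | none => rfl
          | some w =>
              have hcons := PySem.List.pyRange_neg_one_cons (show r < i - 1 by omega)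
              by_cases hw : w = " "
              · simp [hw]
              · simp [hw, hcons]
        · rw [if_neg hr0, if_neg hr0]
      · -- boundary: A stops here, B's while stops here too
        simp only [if_neg hvp]
        have hstop : nizGoreFind pozicija j protivnik (i - 1) (Nat.succ n) = i - 1 := by
          unfold nizGoreFind
          rw [if_neg]
          intro ⟨_, hc⟩
          rw [hv] at hc
          exact hvp (Option.some.inj hc)
        simp only [hstop]
        rw [if_pos (by omega : i - 1 ≥ 0), hv]
        by_cases hsp : v = " "
        · simp [hsp]
        · simp [hsp, PySem.List.pyRange_neg_one_eq_nil (le_refl (i - 1))]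

-- ===== VERDICT (by name: the statement is the Claim_ definition above) =====
theorem niz_gore_spec : Claim_equal_niz_gore := by
  intro pozicija i j protivnik _ hpre
  unfold Spec_niz_gore niz_gore niz_gore_alt
  have h := nizGore_main pozicija j protivnik i.toNat i [] rfl hpre
  rw [h]
  simp only [List.nil_append]
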